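-- pv_equiv track=rewrite | github.com/thealper2/codewars-solutions | 6-kyu/word_to_initial_number.py | convert
-- ===== SOURCE A (Python) =====
-- def convert(st):
--     if not st:
--         return 0
--
--     st = st.upper()
--     if len(st) == 1:
--         return 1
--
--     mapping = {}
--     digits_used = 0
--     available_digits = list(range(10))
--
--     for char in st:
--         if char not in mapping:
--             if len(mapping) == 0:
--                 mapping[char] = 1
--                 available_digits.remove(1)
--                 digits_used += 1
--             else:
--                 if 0 in available_digits and len(mapping) == 1:
--                     mapping[char] = 0
--                     available_digits.remove(0)
--                 else:
--                     mapping[char] = available_digits[0]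
--                     available_digits = available_digits[1:]
--                 digits_used += 1
--
--     result_str = ''.join(str(mapping[char]) for char in st)
--     return int(result_str)
-- ===== SOURCE B (Python) =====
-- def convert(st):
--     # Two-pass rewrite: extract the distinct characters once, pair them with the
--     # fixed digit string "1023456789", then translate the whole word in one go.
--     if not st:
--         return 0
--     st = st.upper()
--     order = list(dict.fromkeys(st))
--     digits = "1023456789"
--     mapping = {c: digits[i] for i, c in enumerate(order)}
--     return int("".join(mapping[c] for c in st))
-- ===== Notes on version B (the rewrite author's own statement) =====
-- stated objective: simpler
-- what changed: B drops A's mutable available-digits list, the digits_used counter and the three-way branch cascade: it extracts the distinct characters once (dict.fromkeys), zips them with a fixed precomputed digit sequence (1,0,2,3,...,9) into a char-to-char table, and translates the word in a single join.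
import Mathlib
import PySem

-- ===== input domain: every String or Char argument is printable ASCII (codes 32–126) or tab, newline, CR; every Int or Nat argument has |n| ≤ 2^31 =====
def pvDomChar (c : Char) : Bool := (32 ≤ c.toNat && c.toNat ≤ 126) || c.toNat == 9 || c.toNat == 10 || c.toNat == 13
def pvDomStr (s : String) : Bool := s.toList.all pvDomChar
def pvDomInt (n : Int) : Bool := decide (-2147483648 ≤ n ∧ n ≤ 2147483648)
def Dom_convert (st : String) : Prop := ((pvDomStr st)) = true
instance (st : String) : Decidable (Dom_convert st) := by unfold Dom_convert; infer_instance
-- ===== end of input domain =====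

-- B replaces A's mutable available-digits list and branch cascade by a two-pass translation
-- through the fixed digit string "1023456789" (objective: simpler).

-- ===== PORT A =====
-- body of A's for-loop; state = (mapping, digits_used, available_digits);
-- none = the raising paths (IndexError on available_digits[0] of an empty list — excluded by
-- Pre_convert — and ValueError of .remove, never reached from A's start state)
def convertStep (acc : Option (PySem.Dict Char Int × Int × List Int)) (char : Char) :
    Option (PySem.Dict Char Int × Int × List Int) :=
  match acc with
  | none => none
  | some (mapping, digits_used, available_digits) =>
    if mapping.contains char then some (mapping, digits_used, available_digits)
    else if mapping.size = 0 then
      match PySem.List.remove? available_digits (1 : Int) with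
      | none => none
      | some a => some (mapping.insert char 1, digits_used + 1, a)
    else if available_digits.contains (0 : Int) && mapping.size == 1 then
      match PySem.List.remove? available_digits (0 : Int) with
      | none => none
      | some a => some (mapping.insert char 0, digits_used + 1, a)
    else
      match PySem.List.pyGet? available_digits 0 with
      | none => none
      | some d => some (mapping.insert char d, digits_used + 1,
                        PySem.List.slice available_digits (some 1) none)

def convert (st : String) : Int :=
  if st.toList = [] then 0
  else
    let s := PySem.Chars.upper st.toList
    if s.length = 1 then 1
    else
      match s.foldl convertStep
          (some (PySem.Dict.empty, 0, PySem.List.pyRange 0 10 1)) with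
      | none => 0   -- Python raises IndexError here (11th distinct char); excluded by Pre_convert
      | some (mapping, _, _) =>
        -- int(''.join(str(mapping[char]) for char in st)); mapping[char] never misses
        -- (every char of s was inserted) and the joined digit string is non-empty, so both
        -- getD defaults are unreachable
        (PySem.Int.ofChars?
          ((s.map (fun c => PySem.Int.toChars (mapping.getD c 0))).flatten)).getD 0

-- ===== PORT B =====
def convert_alt (st : String) : Int :=
  if st.toList = [] then 0
  else
    let s := PySem.Chars.upper st.toList
    let order := PySem.List.dedup s
    let digits : List Char := ['1', '0', '2', '3', '4', '5', '6', '7', '8', '9']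
    -- {c: digits[i] for i, c in enumerate(order)}; digits[i] raises IndexError for i ≥ 10
    -- (11th distinct char, excluded by Pre_convert), so the getD default is unreachable
    let mapping : PySem.Dict Char Char :=
      (PySem.List.enumerate order).foldl
        (fun d p => d.insert p.2 ((PySem.List.pyGet? digits p.1).getD '0'))
        PySem.Dict.empty
    -- int("".join(mapping[c] for c in st)); mapping[c] never misses, the string is non-empty
    (PySem.Int.ofChars? (s.map (fun c => mapping.getD c '0'))).getD 0

-- ===== PRECONDITION & SPEC =====
-- Pre_ excludes strings with more than 10 distinct (uppercased) characters: there both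
-- programs raise IndexError (A on available_digits[0], B on digits[i]).
def Pre_convert (st : String) : Prop :=
  (PySem.List.dedup (PySem.Chars.upper st.toList)).length ≤ 10
instance (st : String) : Decidable (Pre_convert st) := by unfold Pre_convert; infer_instance

def pvWitness_convert : String := "Mississippi"

def Spec_convert (st : String) (out : Int) : Prop := out = convert_alt st
instance (st : String) (out : Int) : Decidable (Spec_convert st out) := by
  unfold Spec_convert; infer_instance

-- ===== CLAIM (what is proved, stated in full; the proofs are below) =====
def Claim_equal_convert : Prop :=
  ∀ (st : String), Dom_convert st → Pre_convert st → Spec_convert st (convert st)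

-- ===== LEMMAS AND PROOFS =====

def enumMap {β : Type} (f : Int → β) (d : List Char) (s : Int) : PySem.Dict Char β :=
  PySem.Dict.mk ((PySem.List.enumerate d s).map (fun p => (p.2, f p.1)))

lemma contains_enumMap {β : Type} (f : Int → β) (d : List Char) (s : Int) (c : Char) :
    (enumMap f d s).contains c = d.contains c := by
  induction d generalizing s with
  | nil => simp [enumMap, PySem.Dict.contains, PySem.List.enumerate_nil]
  | cons x t ih =>
    have := ih (s + 1)
    simp [enumMap, PySem.Dict.contains, PySem.List.enumerate_cons] at this ⊢
    rw [this]
    by_cases h : c = x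
    · simp [h]
    · have hxc : ¬ (x == c) = true := by simpa using fun he => h he.symm
      simp [h, hxc]

lemma size_enumMap {β : Type} (f : Int → β) (d : List Char) (s : Int) :
    (enumMap f d s).size = d.length := by
  simp [enumMap, PySem.Dict.size, PySem.List.length_enumerate]

lemma insert_enumMap {β : Type} (f : Int → β) (d : List Char) (s : Int) (c : Char)
    (hc : c ∉ d) (v : β) (hv : v = f (s + d.length)) :
    (enumMap f d s).insert c v = enumMap f (d ++ [c]) s := by
  have hcon : (enumMap f d s).contains c = false := by
    rw [contains_enumMap]; simpa using hc
  unfold PySem.Dict.insert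
  rw [hcon]
  simp [enumMap, PySem.List.enumerate_append, hv]

lemma getD_enumMap {β : Type} (f : Int → β) (d : List Char) (s : Int) (hd : d.Nodup)
    (i : Nat) (hi : i < d.length) (dflt : β) :
    (enumMap f d s).getD d[i] dflt = f (s + i) := by
  induction d generalizing s i with
  | nil => simp at hi
  | cons x t ih =>
    rcases i with _ | j
    · simp [enumMap, PySem.Dict.getD, PySem.Dict.get?, PySem.List.enumerate_cons]
    · have hj : j < t.length := by simpa using hi
      have hx : x ≠ t[j] := by
        have hm : t[j] ∈ t := List.getElem_mem _
        intro h
        rw [List.nodup_cons] at hd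
        exact hd.1 (h ▸ hm)
      have ht : t.Nodup := (List.nodup_cons.mp hd).2
      have key := ih (s + 1) ht j hj
      have harith : s + 1 + (j : Int) = s + ((j : Int) + 1) := by ring
      rw [harith] at key
      simp only [enumMap, PySem.Dict.getD, PySem.Dict.get?, PySem.List.enumerate_cons,
        List.map_cons, List.getElem_cons_succ] at key ⊢
      rw [List.find?_cons_of_neg (by simpa using hx)]
      rw [List.find?_map] at key ⊢
      simpa using key

lemma dedup_append_singleton (p : List Char) (c : Char) :
    PySem.List.dedup (p ++ [c]) =
      if c ∈ PySem.List.dedup p then PySem.List.dedup p else PySem.List.dedup p ++ [c] := by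
  simp [PySem.List.dedup, PySem.Set.ofList_eq_foldl, List.foldl_append, PySem.Set.add,
    PySem.Set.contains]

def fC : Int → Char := fun i => (PySem.List.pyGet? (['1','0','2','3','4','5','6','7','8','9'] : List Char) i).getD '0'

lemma loopB (d : List Char) (hd : d.Nodup) :
    (PySem.List.enumerate d).foldl
        (fun m p => m.insert p.2
          ((PySem.List.pyGet? ['1', '0', '2', '3', '4', '5', '6', '7', '8', '9'] p.1).getD '0'))
        PySem.Dict.empty =
      enumMap fC d 0 := by
  induction d using List.reverseRecOn with
  | nil => simp [enumMap, PySem.List.enumerate_nil, PySem.Dict.empty]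
  | append_singleton t c ih =>
    have ht : t.Nodup := (List.nodup_append.mp hd).1
    have hc : c ∉ t := by
      have := (List.nodup_append.mp hd).2.2
      intro hmem
      exact (this c hmem c (List.mem_singleton_self c)) rfl
    rw [PySem.List.enumerate_append, List.foldl_append, ih ht]
    simp only [PySem.List.enumerate_cons, PySem.List.enumerate_nil, List.foldl_cons,
      List.foldl_nil]
    exact insert_enumMap _ t 0 c hc _ (by norm_num [fC])

def availF (k : Nat) : List Int :=
  if k = 0 then [0, 1, 2, 3, 4, 5, 6, 7, 8, 9]
  else if k = 1 then [0, 2, 3, 4, 5, 6, 7, 8, 9]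
  else List.drop k [0, 1, 2, 3, 4, 5, 6, 7, 8, 9]

lemma length_dedup_append_le (p : List Char) (c : Char) :
    (PySem.List.dedup p).length ≤ (PySem.List.dedup (p ++ [c])).length := by
  rw [dedup_append_singleton]
  split <;> simp

def fI : Int → Int := fun i => (PySem.List.pyGet? ([1, 0, 2, 3, 4, 5, 6, 7, 8, 9] : List Int) i).getD 0

lemma stepNew (d : List Char) (c : Char) (hc : c ∉ d) (h9 : d.length ≤ 9) :
    convertStep (some (enumMap fI d 0, (d.length : Int), availF d.length)) c =
      some (enumMap fI (d ++ [c]) 0, ((d.length : Int) + 1), availF (d.length + 1)) := by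
  have hcon : (enumMap fI d 0).contains c = false := by
    rw [contains_enumMap]; simpa using hc
  have hsize : (enumMap fI d 0).size = d.length := size_enumMap fI d 0
  have hins : ∀ v : Int, v = fI ((d.length : Int)) →
      (enumMap fI d 0).insert c v = enumMap fI (d ++ [c]) 0 := by
    intro v hv
    exact insert_enumMap fI d 0 c hc v (by simpa using hv)
  obtain ⟨k, hk⟩ : ∃ k, d.length = k := ⟨_, rfl⟩
  simp only [convertStep]
  split_ifs with h1 h2 h3
  · exact absurd hcon (by simp [h1])
  · -- len(mapping) == 0
    rw [hsize, hk] at h2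
    subst h2
    have : availF d.length = [0,1,2,3,4,5,6,7,8,9] := by rw [hk]; rfl
    rw [this]
    have hrem : PySem.List.remove? ([0,1,2,3,4,5,6,7,8,9] : List Int) 1 = some [0,2,3,4,5,6,7,8,9] := by decide
    rw [hrem]
    rw [hins 1 (by rw [hk]; rfl)]
    rw [hk]
    rfl
  · -- 0 in available and len(mapping) == 1
    have hk1 : k = 1 := by
      have := (Bool.and_eq_true _ _).mp h3
      have h2' := this.2
      rw [hsize, hk] at h2'
      simpa using h2'
    subst hk1
    have havail1 : availF d.length = [0,2,3,4,5,6,7,8,9] := by rw [hk]; rfl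
    rw [havail1]
    have hrem : PySem.List.remove? ([0,2,3,4,5,6,7,8,9] : List Int) 0 = some [2,3,4,5,6,7,8,9] := by decide
    rw [hrem]
    rw [hins 0 (by rw [hk]; rfl)]
    rw [hk]
    rfl
  · -- the generic branch: k ≥ 2
    have hk2 : 2 ≤ k := by
      rcases Nat.lt_or_ge k 2 with h | h
      · interval_cases k
        · rw [hsize, hk] at h2; simp at h2
        · exfalso
          apply h3
          rw [hsize, hk]
          decide
      · exact h
    have h9' : k ≤ 9 := hk ▸ h9
    have havail : availF d.length = List.drop k [0,1,2,3,4,5,6,7,8,9] := by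
      rw [hk, availF]
      simp only [if_neg (by omega : ¬ k = 0), if_neg (by omega : ¬ k = 1)]
    rw [havail, hk]
    interval_cases k
    · exact congrArg (fun m => some (m, ((2:Nat):Int) + 1, availF 3)) (hins 2 (by rw [hk]; rfl))
    · exact congrArg (fun m => some (m, ((3:Nat):Int) + 1, availF 4)) (hins 3 (by rw [hk]; rfl))
    · exact congrArg (fun m => some (m, ((4:Nat):Int) + 1, availF 5)) (hins 4 (by rw [hk]; rfl))
    · exact congrArg (fun m => some (m, ((5:Nat):Int) + 1, availF 6)) (hins 5 (by rw [hk]; rfl))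
    · exact congrArg (fun m => some (m, ((6:Nat):Int) + 1, availF 7)) (hins 6 (by rw [hk]; rfl))
    · exact congrArg (fun m => some (m, ((7:Nat):Int) + 1, availF 8)) (hins 7 (by rw [hk]; rfl))
    · exact congrArg (fun m => some (m, ((8:Nat):Int) + 1, availF 9)) (hins 8 (by rw [hk]; rfl))
    · exact congrArg (fun m => some (m, ((9:Nat):Int) + 1, availF 10)) (hins 9 (by rw [hk]; rfl))

lemma loopA (p : List Char) (hp : (PySem.List.dedup p).length ≤ 10) :
    p.foldl convertStep (some (PySem.Dict.empty, 0, PySem.List.pyRange 0 10 1)) =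
      some (enumMap fI (PySem.List.dedup p) 0,
            ((PySem.List.dedup p).length : Int),
            availF (PySem.List.dedup p).length) := by
  induction p using List.reverseRecOn with
  | nil =>
    simp [enumMap, PySem.List.enumerate_nil, PySem.Dict.empty, PySem.List.dedup,
      PySem.Set.ofList, availF]
    decide
  | append_singleton t c ih =>
    rw [List.foldl_append, List.foldl_cons, List.foldl_nil,
      ih (le_trans (length_dedup_append_le t c) hp)]
    rw [dedup_append_singleton] at hp ⊢
    by_cases hc : c ∈ PySem.List.dedup t
    · have hcon : (enumMap fI (PySem.List.dedup t) 0).contains c = true := by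
        rw [contains_enumMap]; simpa using hc
      simp only [if_pos hc, convertStep]
      rw [if_pos hcon]
    · have hlen : (PySem.List.dedup t).length + 1 ≤ 10 := by
        rw [if_neg hc, List.length_append] at hp
        simpa using hp
      simp only [if_neg hc]
      rw [stepNew (PySem.List.dedup t) c hc (by omega)]
      simp

lemma flattenSingles (g : Char → Char) (l : List Char) :
    (l.map (fun c => [g c])).flatten = l.map g := by
  induction l with
  | nil => rfl
  | cons x t ih => simp [ih]

lemma mapsAgree (d : List Char) (hd : d.Nodup) (h10 : d.length ≤ 10) (c : Char) (hc : c ∈ d) :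
    PySem.Int.toChars ((enumMap fI d 0).getD c 0) = [(enumMap fC d 0).getD c '0'] := by
  obtain ⟨i, hi, rfl⟩ := List.mem_iff_getElem.mp hc
  rw [getD_enumMap fI d 0 hd i hi, getD_enumMap fC d 0 hd i hi]
  have hi10 : i ≤ 9 := by omega
  interval_cases i <;> decide

theorem convert_spec_main (st : String) (hpre : (PySem.List.dedup (PySem.Chars.upper st.toList)).length ≤ 10) :
    convert st = convert_alt st := by
  unfold convert convert_alt
  by_cases h0 : st.toList = []
  · simp [h0]
  · simp only [if_neg h0]
    have hd : (PySem.List.dedup (PySem.Chars.upper st.toList)).Nodup := by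
      simpa using PySem.Set.nodup_ofList (PySem.Chars.upper st.toList)
    rw [loopA (PySem.Chars.upper st.toList) hpre,
        loopB (PySem.List.dedup (PySem.Chars.upper st.toList)) hd]
    have hL : ((PySem.Chars.upper st.toList).map
          (fun c => PySem.Int.toChars
            ((enumMap fI (PySem.List.dedup (PySem.Chars.upper st.toList)) 0).getD c 0))).flatten =
        (PySem.Chars.upper st.toList).map
          (fun c => (enumMap fC (PySem.List.dedup (PySem.Chars.upper st.toList)) 0).getD c '0') := by
      rw [List.map_congr_left (fun c hc =>
        mapsAgree (PySem.List.dedup (PySem.Chars.upper st.toList)) hd hpre c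
          (by simpa [PySem.List.mem_dedup] using hc))]
      exact flattenSingles _ _
    by_cases h1 : (PySem.Chars.upper st.toList).length = 1
    · simp only [if_pos h1]
      obtain ⟨c, hc⟩ := List.length_eq_one_iff.mp h1
      rw [hc]
      have hded : PySem.List.dedup [c] = [c] := rfl
      rw [hded]
      have hone : (enumMap fC [c] 0).getD c '0' = '1' := by
        simp [enumMap, PySem.Dict.getD, PySem.Dict.get?, PySem.List.enumerate_cons,
          PySem.List.enumerate_nil, fC]
      simp only [List.map_cons, List.map_nil, hone]
      decide
    · simp only [if_neg h1]
      rw [hL]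

-- ===== VERDICT (by name: the statement is the Claim_ definition above) =====
theorem convert_spec : Claim_equal_convert := by
  intro st _ hpre
  exact convert_spec_main st hpre
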